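-- pv_equiv track=rewrite | github.com/aditya-r-m/coding-competitions-archive | codejam/2010/round_1a/number_game/solution.py | solve
-- ===== SOURCE A (Python) =====
-- def solve(range_pair: ((int, int), (int, int))) -> int:
--     winning_positions = 0
--     is_thin = lambda height, length: 5 * (height ** 2) < (2 * length - height) ** 2
--     for ((winning_step, limiting_step), range_opponent) in [range_pair, range_pair[::-1]]:
--         for opponent_step in range(*range_opponent):
--             while winning_step < limiting_step and not is_thin(opponent_step, winning_step): winning_step += 1
--             winning_positions += limiting_step - winning_step
--     return winning_positions
-- ===== SOURCE B (Python) =====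
-- def solve(range_pair: ((int, int), (int, int))) -> int:
--     # closed-form advance: winning_step jumps straight to the first "thin" position,
--     # computed from the integer square root of 5*opponent_step^2
--     def isqrt(n):
--         lo, hi = 0, n
--         while lo < hi:
--             mid = (lo + hi + 1) // 2
--             if mid * mid <= n:
--                 lo = mid
--             else:
--                 hi = mid - 1
--         return lo
--
--     def count(window, opponents):
--         ws, limit = window
--         o, hi = opponents
--         total = 0
--         while o < hi:
--             if ws < limit and (2 * ws - o) ** 2 <= 5 * o * o:
--                 r = isqrt(5 * o * o)
--                 ws = min(limit, (o + r) // 2 + 1)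
--             total += limit - ws
--             o += 1
--         return total
--
--     first, second = range_pair
--     return count(first, second) + count(second, first)
-- ===== Notes on version B (the rewrite author's own statement) =====
-- stated objective: alternative
-- what changed: A advances winning_step with a linear +1 scan per opponent step; B jumps winning_step directly to the first thin position via a closed-form threshold (o + isqrt(5*o^2))//2 + 1, with isqrt a hand-rolled binary search, and restructures the outer traversal as a count() helper called once per orientation and summed.
import Mathlib
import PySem

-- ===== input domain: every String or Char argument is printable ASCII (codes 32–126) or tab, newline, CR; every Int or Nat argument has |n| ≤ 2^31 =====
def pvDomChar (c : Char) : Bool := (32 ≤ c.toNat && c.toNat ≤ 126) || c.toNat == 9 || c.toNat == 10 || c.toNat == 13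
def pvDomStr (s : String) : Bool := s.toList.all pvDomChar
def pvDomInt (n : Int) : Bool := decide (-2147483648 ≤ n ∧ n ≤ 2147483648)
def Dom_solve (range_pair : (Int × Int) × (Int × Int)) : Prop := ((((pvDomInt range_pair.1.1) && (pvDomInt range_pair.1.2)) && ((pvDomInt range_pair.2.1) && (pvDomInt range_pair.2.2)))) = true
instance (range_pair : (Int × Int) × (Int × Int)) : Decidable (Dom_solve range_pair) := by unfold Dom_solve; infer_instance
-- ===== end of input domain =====

-- B replaces A's linear `winning_step += 1` scan with a closed-form jump to the first
-- "thin" position, computed from an integer square root; objective: alternative algorithm,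
-- same return value.

-- ===== PORT A =====

-- A's inner `while winning_step < limiting_step and not is_thin(...): winning_step += 1`;
-- fuel = (limit - ws).toNat is exactly enough: each iteration needs ws < limit and does ws += 1
def solveAdvanceGo (h limit : Int) : Nat → Int → Int
  | 0, ws => ws
  | Nat.succ n, ws =>
    if ws < limit ∧ ¬ (5 * h ^ 2 < (2 * ws - h) ^ 2) then solveAdvanceGo h limit n (ws + 1)
    else ws

def solveAdvance (h ws limit : Int) : Int := solveAdvanceGo h limit (limit - ws).toNat ws

-- one iteration of A's `for opponent_step in range(...)` body, state = (winning_positions, winning_step)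
def solveStepA (limit : Int) (st : Int × Int) (op : Int) : Int × Int :=
  let ws := solveAdvance op st.2 limit
  (st.1 + (limit - ws), ws)

def solve (range_pair : (Int × Int) × (Int × Int)) : Int :=
  [(range_pair.1, range_pair.2), (range_pair.2, range_pair.1)].foldl
    (fun winning_positions pr =>
      ((PySem.List.pyRange pr.2.1 pr.2.2 1).foldl (solveStepA pr.1.2)
        (winning_positions, pr.1.1)).1)
    0

-- ===== PORT B =====

-- B's `isqrt`: binary search `while lo < hi` on [0, n]; the interval shrinks by at least one
-- each iteration, so fuel n.toNat (the initial width) is enough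
def solveIsqrtGo (n : Int) : Nat → Int → Int → Int
  | 0, lo, _ => lo
  | Nat.succ f, lo, hi =>
    if lo < hi then
      let mid := PySem.Int.floordiv (lo + hi + 1) 2
      if mid * mid ≤ n then solveIsqrtGo n f mid hi else solveIsqrtGo n f lo (mid - 1)
    else lo

def solveIsqrt (n : Int) : Int := solveIsqrtGo n n.toNat 0 n

-- B's `count`: `while o < hi` loop, state = (o, total, ws); fuel = (hi - o).toNat
def solveCountGo (limit hi : Int) : Nat → Int → Int → Int → Int
  | 0, _, total, _ => total
  | Nat.succ f, o, total, ws =>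
    if o < hi then
      let ws' := if ws < limit ∧ (2 * ws - o) ^ 2 ≤ 5 * o * o then
          min limit (PySem.Int.floordiv (o + solveIsqrt (5 * o * o)) 2 + 1) else ws
      solveCountGo limit hi f (o + 1) (total + (limit - ws')) ws'
    else total

def solveCount (window opponents : Int × Int) : Int :=
  solveCountGo window.2 opponents.2 (opponents.2 - opponents.1).toNat opponents.1 0 window.1

def solve_alt (range_pair : (Int × Int) × (Int × Int)) : Int :=
  solveCount range_pair.1 range_pair.2 + solveCount range_pair.2 range_pair.1

-- ===== PRECONDITION & SPEC =====
def Spec_solve (range_pair : (Int × Int) × (Int × Int)) (out : Int) : Prop := out = solve_alt range_pair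
instance (range_pair : (Int × Int) × (Int × Int)) (out : Int) : Decidable (Spec_solve range_pair out) := by unfold Spec_solve; infer_instance

-- ===== CLAIM (what is proved, stated in full; the proofs are below) =====
def Claim_equal_solve : Prop := ∀ (range_pair : (Int × Int) × (Int × Int)), Dom_solve range_pair → Spec_solve range_pair (solve range_pair)

-- ===== LEMMAS AND PROOFS =====

-- proof-side model of A's scan, without fuel
def advW (h ws limit : Int) : Int :=
  if ws < limit ∧ ¬ (5 * h ^ 2 < (2 * ws - h) ^ 2) then advW h (ws + 1) limit else ws
termination_by (limit - ws).toNat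
decreasing_by omega

-- the fuelled port equals the model whenever the fuel is sufficient
theorem advGo_eq (h limit : Int) : ∀ (n : Nat) (ws : Int), (limit - ws).toNat ≤ n →
    solveAdvanceGo h limit n ws = advW h ws limit := by
  intro n
  induction n with
  | zero =>
    intro ws hn
    rw [solveAdvanceGo, advW, if_neg (by omega)]
  | succ n ih =>
    intro ws hn
    rw [solveAdvanceGo]
    by_cases hc : ws < limit ∧ ¬ (5 * h ^ 2 < (2 * ws - h) ^ 2)
    · rw [if_pos hc, advW, if_pos hc]
      exact ih (ws + 1) (by omega)
    · rw [if_neg hc, advW, if_neg hc]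

-- A's scan skips over a block of non-thin positions
theorem advW_skip (h lo lo' hi : Int) (hlo : lo ≤ lo') (hhi : lo' ≤ hi)
    (hall : ∀ l, lo ≤ l → l < lo' → ¬ 5 * h ^ 2 < (2 * l - h) ^ 2) :
    advW h lo hi = advW h lo' hi := by
  by_cases heq : lo = lo'
  · rw [heq]
  · have hlt : lo < lo' := lt_of_le_of_ne hlo heq
    rw [advW, if_pos ⟨lt_of_lt_of_le hlt hhi, hall lo le_rfl hlt⟩]
    exact advW_skip h (lo + 1) lo' hi (by omega) hhi (fun l h1 h2 => hall l (by omega) h2)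
termination_by (lo' - lo).toNat
decreasing_by omega

-- B's binary search returns the integer square root of n ≥ 0
theorem isqrtGo_spec (n : Int) : ∀ (f : Nat) (lo hi : Int), (hi - lo).toNat ≤ f →
    0 ≤ lo → lo ≤ hi → lo * lo ≤ n → n < (hi + 1) * (hi + 1) →
    0 ≤ solveIsqrtGo n f lo hi ∧ solveIsqrtGo n f lo hi * solveIsqrtGo n f lo hi ≤ n ∧
      n < (solveIsqrtGo n f lo hi + 1) * (solveIsqrtGo n f lo hi + 1) := by
  intro f
  induction f with
  | zero =>
    intro lo hi hf h0 hle hl hu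
    have : lo = hi := by omega
    rw [solveIsqrtGo]
    subst this
    exact ⟨h0, hl, hu⟩
  | succ f ih =>
    intro lo hi hf h0 hle hl hu
    rw [solveIsqrtGo]
    by_cases hlt : lo < hi
    · rw [if_pos hlt]
      have hmid : lo < PySem.Int.floordiv (lo + hi + 1) 2 ∧
          PySem.Int.floordiv (lo + hi + 1) 2 ≤ hi := by
        rw [PySem.Int.floordiv_eq_ediv_of_pos (by norm_num)]
        omega
      by_cases hsq : PySem.Int.floordiv (lo + hi + 1) 2 * PySem.Int.floordiv (lo + hi + 1) 2 ≤ n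
      · rw [if_pos hsq]
        exact ih _ hi (by omega) (by omega) hmid.2 hsq hu
      · rw [if_neg hsq]
        exact ih lo _ (by omega) h0 (by omega) hl (by rw [not_le] at hsq; nlinarith [hmid.1])
    · rw [if_neg hlt]
      exact ⟨h0, hl, by nlinarith⟩

theorem isqrt_spec (n : Int) (hn : 0 ≤ n) :
    0 ≤ solveIsqrt n ∧ solveIsqrt n * solveIsqrt n ≤ n ∧
      n < (solveIsqrt n + 1) * (solveIsqrt n + 1) :=
  isqrtGo_spec n n.toNat 0 n (by omega) le_rfl hn (by simpa) (by nlinarith)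

-- B's closed-form update equals A's linear scan
theorem stepB_eq (o ws limit : Int) :
    (if ws < limit ∧ (2 * ws - o) ^ 2 ≤ 5 * o * o then
        min limit (PySem.Int.floordiv (o + solveIsqrt (5 * o * o)) 2 + 1) else ws)
    = advW o ws limit := by
  have hiff : ((2 * ws - o) ^ 2 ≤ 5 * o * o) ↔ ¬ (5 * o ^ 2 < (2 * ws - o) ^ 2) := by
    rw [not_lt]; constructor <;> intro h <;> nlinarith
  by_cases hc : ws < limit ∧ ¬ (5 * o ^ 2 < (2 * ws - o) ^ 2)
  · rw [if_pos ⟨hc.1, hiff.mpr hc.2⟩]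
    obtain ⟨hr0, hrl, hru⟩ := isqrt_spec (5 * o * o) (by nlinarith)
    set r := solveIsqrt (5 * o * o) with hr
    set L := PySem.Int.floordiv (o + r) 2 + 1 with hL
    have hfd : o + r - 1 ≤ 2 * PySem.Int.floordiv (o + r) 2 ∧
        2 * PySem.Int.floordiv (o + r) 2 ≤ o + r := by
      rw [PySem.Int.floordiv_eq_ediv_of_pos (by norm_num)]
      omega
    have hws1 : 2 * ws - o ≤ r := by nlinarith [hc.2, hiff.mpr hc.2]
    have hws2 : -r ≤ 2 * ws - o := by nlinarith [hiff.mpr hc.2]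
    have hwsL : ws < L := by omega
    have hm : ws ≤ min limit L := by omega
    rw [advW_skip o ws (min limit L) limit hm (min_le_left _ _)
        (fun l h1 h2 => by
          have h3 : l < L := lt_of_lt_of_le h2 (min_le_right _ _)
          have h4 : 2 * l - o ≤ r := by omega
          have h5 : -r ≤ 2 * l - o := by omega
          nlinarith)]
    by_cases hml : limit ≤ L
    · rw [min_eq_left hml, advW, if_neg (by omega)]
    · have hLlim : L < limit := by omega
      rw [min_eq_right (le_of_lt hLlim), advW, if_neg (fun hx => hx.2 (by
        have h6 : r + 1 ≤ 2 * L - o := by omega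
        nlinarith))]
  · rw [if_neg (fun hb => hc ⟨hb.1, hiff.mp hb.2⟩), advW, if_neg hc]

-- common model of the per-opponent loop: count with A's scan, no fuel
def cntW (limit o hi ws : Int) : Int :=
  if o < hi then (limit - advW o ws limit) + cntW limit (o + 1) hi (advW o ws limit)
  else 0
termination_by (hi - o).toNat
decreasing_by omega

-- A's inner foldl over range(lo, hi) computes acc + cntW
theorem foldA (limit : Int) : ∀ (n : Nat) (lo hi acc ws : Int), (hi - lo).toNat ≤ n →
    ((PySem.List.pyRange lo hi 1).foldl (solveStepA limit) (acc, ws)).1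
      = acc + cntW limit lo hi ws := by
  intro n
  induction n with
  | zero =>
    intro lo hi acc ws hn
    have hle : ¬ lo < hi := by omega
    rw [PySem.List.pyRange_one, show (hi - lo).toNat = 0 by omega]
    rw [cntW, if_neg hle]
    simp
  | succ n ih =>
    intro lo hi acc ws hn
    by_cases hlt : lo < hi
    · rw [PySem.List.pyRange_one_cons hlt, List.foldl_cons]
      show ((PySem.List.pyRange (lo + 1) hi 1).foldl (solveStepA limit)
        (acc + (limit - solveAdvance lo ws limit), solveAdvance lo ws limit)).1 = _
      conv_rhs => rw [cntW, if_pos hlt]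
      rw [ih (lo + 1) hi _ _ (by omega),
        solveAdvance, advGo_eq lo limit _ ws le_rfl]
      ring
    · rw [PySem.List.pyRange_one, show (hi - lo).toNat = 0 by omega]
      rw [cntW, if_neg hlt]
      simp

-- B's fuelled while-loop computes total + cntW
theorem foldB (limit hi : Int) : ∀ (f : Nat) (o total ws : Int), (hi - o).toNat ≤ f →
    solveCountGo limit hi f o total ws = total + cntW limit o hi ws := by
  intro f
  induction f with
  | zero =>
    intro o total ws hf
    rw [solveCountGo, cntW, if_neg (by omega)]
    ring
  | succ f ih =>
    intro o total ws hf
    rw [solveCountGo]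
    by_cases hlt : o < hi
    · rw [if_pos hlt]
      simp only [stepB_eq o ws limit]
      conv_rhs => rw [cntW, if_pos hlt]
      rw [ih (o + 1) _ _ (by omega)]
      ring
    · rw [if_neg hlt, cntW, if_neg hlt]
      ring

-- ===== VERDICT (by name: the statement is the Claim_ definition above) =====
theorem solve_spec : Claim_equal_solve := by
  intro rp _
  unfold Spec_solve solve solve_alt solveCount
  rw [List.foldl_cons, List.foldl_cons, List.foldl_nil]
  rw [foldA rp.1.2 (rp.2.2 - rp.2.1).toNat rp.2.1 rp.2.2 0 rp.1.1 le_rfl,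
    foldA rp.2.2 (rp.1.2 - rp.1.1).toNat rp.1.1 rp.1.2 _ rp.2.1 le_rfl,
    foldB rp.1.2 rp.2.2 _ rp.2.1 0 rp.1.1 le_rfl,
    foldB rp.2.2 rp.1.2 _ rp.1.1 0 rp.2.1 le_rfl]
  ring
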